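-- pv_equiv track=rewrite | github.com/RezisEwig/Programmers-codes | Level_2/더_맵게.py | solution
-- ===== SOURCE A (Python) =====
-- import heapq
--
-- def solution(scoville, K):
--     heap = []
--     answer = 0
--     for i in scoville:
--         heapq.heappush(heap, i)
--
--     while heap[0] < K :
--
--         try :
--             heapq.heappush(heap, heapq.heappop(heap) + (heapq.heappop(heap)*2))
--         except IndexError :
--             return -1
--
--         answer += 1
--
--     return answer
-- ===== SOURCE B (Python) =====
-- from collections import deque
--
--
-- def _peek(base, q):
--     # least remaining value: fronts of the two ascending queues
--     if base and (not q or base[0] <= q[0]):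
--         return base[0]
--     return q[0]
--
--
-- def _pop(base, q):
--     if base and (not q or base[0] <= q[0]):
--         return base.popleft()
--     return q.popleft()
--
--
-- def solution(scoville, K):
--     # Sort once; keep the originals and the mixed values in two ascending
--     # queues (mixed values are produced in non-decreasing order), so each
--     # mix is O(1) with no heap/reinsertion.
--     base = deque(sorted(scoville))
--     q = deque()
--     answer = 0
--     while True:
--         if _peek(base, q) >= K:
--             return answer
--         a = _pop(base, q)
--         if not base and not q:
--             return -1
--         b = _pop(base, q)
--         q.append(a + 2 * b)
--         answer += 1
-- ===== Notes on version B (the rewrite author's own statement) =====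
-- stated objective: faster
-- what changed: Replaces the binary heap with one upfront sort plus a two-queue merge: mixed values are appended to a FIFO queue (they arrive in non-decreasing order, proved via the QInv invariant), so each mix is an O(1) pop/append instead of an O(log n) heap reinsertion.
import Mathlib
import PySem

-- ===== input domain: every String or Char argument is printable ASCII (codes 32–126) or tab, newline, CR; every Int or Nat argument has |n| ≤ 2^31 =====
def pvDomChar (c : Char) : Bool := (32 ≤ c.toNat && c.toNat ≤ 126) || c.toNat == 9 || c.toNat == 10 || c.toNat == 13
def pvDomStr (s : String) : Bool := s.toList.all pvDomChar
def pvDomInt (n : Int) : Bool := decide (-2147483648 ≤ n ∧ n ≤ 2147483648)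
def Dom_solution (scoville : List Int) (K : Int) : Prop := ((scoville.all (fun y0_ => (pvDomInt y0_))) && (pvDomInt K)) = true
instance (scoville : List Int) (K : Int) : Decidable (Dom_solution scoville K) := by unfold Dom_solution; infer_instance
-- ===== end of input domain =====

-- B replaces A's heap by one upfront sort plus a two-queue merge (mixed values
-- arrive in non-decreasing order); return values proved equal on nonempty input.

-- ===== PORT A =====
-- heapq is ported by its contract for Int elements: the heap is kept as an
-- ascending list, heappush = ordered insert, heappop = remove the head (for
-- Int values this is observation-for-observation what the binary heap yields:
-- heap[0]/heappop is the minimum value, heappush adds a value).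
def pvInsort (x : Int) : List Int → List Int
  | [] => [x]
  | y :: ys => if x ≤ y then x :: y :: ys else y :: pvInsort x ys

theorem pvInsort_length (x : Int) (l : List Int) : (pvInsort x l).length = l.length + 1 := by
  induction l with
  | nil => rfl
  | cons y ys ih => simp only [pvInsort]; split <;> simp [ih]

-- the `while heap[0] < K` loop of A; `[]` is unreachable on Pre_ (heap[0] raises)
def solutionLoop (K : Int) : List Int → Int → Int
  | [], _ => 0
  | a :: rest, answer =>
    if a < K then
      match rest with
      | [] => -1          -- second heappop raised IndexError → `return -1`
      | b :: rest2 => solutionLoop K (pvInsort (a + 2 * b) rest2) (answer + 1)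
    else answer
termination_by s _ => s.length
decreasing_by simp [pvInsort_length]

def solution (scoville : List Int) (K : Int) : Int :=
  solutionLoop K (scoville.foldl (fun heap i => pvInsort i heap) []) 0

-- ===== PORT B =====
-- `_pop(base, q)` of Source B: the value popped plus the two remaining queues
def bPop : List Int → List Int → Int × List Int × List Int
  | [], [] => (0, [], [])          -- unreachable on Pre_ (q.popleft() raises)
  | [], c :: qs => (c, [], qs)
  | x :: bs, [] => (x, bs, [])
  | x :: bs, c :: qs => if x ≤ c then (x, bs, c :: qs) else (c, x :: bs, qs)

-- `_peek(base, q)` of Source B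
def bPeek : List Int → List Int → Int
  | [], [] => 0                    -- unreachable on Pre_ (q[0] raises)
  | [], c :: _ => c
  | x :: _, [] => x
  | x :: _, c :: _ => if x ≤ c then x else c

theorem bPop_length (b q : List Int) (h : ¬(b = [] ∧ q = [])) :
    (bPop b q).2.1.length + (bPop b q).2.2.length + 1 = b.length + q.length := by
  match b, q with
  | [], [] => exact absurd ⟨rfl, rfl⟩ h
  | [], c :: qs => simp [bPop]
  | x :: bs, [] => simp [bPop]
  | x :: bs, c :: qs => simp only [bPop]; split <;> simp <;> omega

-- the `while True` loop of Source B
def solutionAltLoop (K : Int) (base q : List Int) (answer : Int) : Int :=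
  if h : base = [] ∧ q = [] then 0   -- unreachable on Pre_; totality guard only
  else if bPeek base q ≥ K then answer
  else if h2 : (bPop base q).2.1 = [] ∧ (bPop base q).2.2 = [] then -1
  else
    solutionAltLoop K (bPop (bPop base q).2.1 (bPop base q).2.2).2.1
      ((bPop (bPop base q).2.1 (bPop base q).2.2).2.2
        ++ [(bPop base q).1 + 2 * (bPop (bPop base q).2.1 (bPop base q).2.2).1])
      (answer + 1)
termination_by base.length + q.length
decreasing_by
  have h1 := bPop_length base q h
  have hx := bPop_length (bPop base q).2.1 (bPop base q).2.2 h2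
  simp only [List.length_append, List.length_cons, List.length_nil]
  omega

def solution_alt (scoville : List Int) (K : Int) : Int :=
  solutionAltLoop K (PySem.List.sorted scoville (fun x => x) false) [] 0

-- ===== PRECONDITION & SPEC =====
-- Pre_ excludes only the empty list, on which A raises IndexError (heap[0]).
def Pre_solution (scoville : List Int) (K : Int) : Prop := scoville ≠ []
instance (scoville : List Int) (K : Int) : Decidable (Pre_solution scoville K) := by
  unfold Pre_solution; infer_instance

def pvWitness_solution : List Int × Int := ([1, 2, 3, 9, 10, 12], 7)

def Spec_solution (scoville : List Int) (K : Int) (out : Int) : Prop := out = solution_alt scoville K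
instance (scoville : List Int) (K : Int) (out : Int) : Decidable (Spec_solution scoville K out) := by
  unfold Spec_solution; infer_instance

-- ===== CLAIM (what is proved, stated in full; the proofs are below) =====
def Claim_equal_solution : Prop := ∀ (scoville : List Int) (K : Int), Dom_solution scoville K → Pre_solution scoville K → Spec_solution scoville K (solution scoville K)

-- ===== LEMMAS AND PROOFS =====

theorem pvInsort_perm (x : Int) (l : List Int) : (pvInsort x l).Perm (x :: l) := by
  induction l with
  | nil => exact List.Perm.refl _
  | cons y ys ih =>
    simp only [pvInsort]
    split
    · exact List.Perm.refl _
    · exact (ih.cons y).trans (List.Perm.swap x y ys)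

theorem pvInsort_sorted (x : Int) (l : List Int) (h : l.Pairwise (· ≤ ·)) :
    (pvInsort x l).Pairwise (· ≤ ·) := by
  induction l with
  | nil => simp [pvInsort]
  | cons y ys ih =>
    rcases List.pairwise_cons.1 h with ⟨hy, hys⟩
    simp only [pvInsort]
    split
    · rename_i hxy
      refine List.pairwise_cons.2 ⟨?_, h⟩
      intro z hz
      rcases List.mem_cons.1 hz with rfl | hz
      · exact hxy
      · exact le_trans hxy (hy z hz)
    · rename_i hxy
      refine List.pairwise_cons.2 ⟨?_, ih hys⟩
      intro z hz
      rcases List.mem_cons.1 ((pvInsort_perm x ys).mem_iff.1 hz) with rfl | hz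
      · omega
      · exact hy z hz

theorem foldl_insort_perm (xs : List Int) : ∀ init : List Int,
    (xs.foldl (fun heap i => pvInsort i heap) init).Perm (xs ++ init) := by
  induction xs with
  | nil => intro init; simp
  | cons x xs ih =>
    intro init
    simp only [List.foldl_cons, List.cons_append]
    refine (ih (pvInsort x init)).trans ?_
    refine (List.Perm.append_left xs (pvInsort_perm x init)).trans ?_
    exact List.perm_middle

theorem foldl_insort_sorted (xs : List Int) : ∀ init : List Int,
    init.Pairwise (· ≤ ·) →
    (xs.foldl (fun heap i => pvInsort i heap) init).Pairwise (· ≤ ·) := by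
  induction xs with
  | nil => intro init h; simpa using h
  | cons x xs ih =>
    intro init h
    exact ih _ (pvInsort_sorted x init h)

-- the queue invariant of B: the mixed-values queue ends in its one possibly
-- "small" element L ≤ 3m, while everything else remaining is ≥ m
def QInv (B Q : List Int) : Prop :=
  Q = [] ∨ ∃ m Q' L, Q = Q' ++ [L] ∧ (∀ x ∈ B, m ≤ x) ∧ (∀ x ∈ Q', m ≤ x) ∧ L ≤ 3 * m

theorem bPeek_eq_pop (B Q : List Int) : bPeek B Q = (bPop B Q).1 := by
  match B, Q with
  | [], [] => rfl
  | [], c :: qs => rfl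
  | x :: bs, [] => rfl
  | x :: bs, c :: qs => simp only [bPeek, bPop]; split <;> rfl

-- one pop from the two sorted queues removes exactly the overall minimum
theorem bPop_spec (B Q s' : List Int) (a : Int)
    (hB : B.Pairwise (· ≤ ·)) (hQ : Q.Pairwise (· ≤ ·))
    (hs : (a :: s').Pairwise (· ≤ ·)) (hperm : (B ++ Q).Perm (a :: s')) :
    (bPop B Q).1 = a ∧ ((bPop B Q).2.1 ++ (bPop B Q).2.2).Perm s' ∧
      ((B = a :: (bPop B Q).2.1 ∧ (bPop B Q).2.2 = Q) ∨
       ((bPop B Q).2.1 = B ∧ Q = a :: (bPop B Q).2.2)) := by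
  have ha : ∀ x ∈ B ++ Q, a ≤ x := by
    intro x hx
    rcases List.mem_cons.1 (hperm.mem_iff.1 hx) with rfl | hx'
    · exact le_refl x
    · exact (List.pairwise_cons.1 hs).1 x hx'
  match B, Q with
  | [], [] => exact absurd hperm.symm (by simp)
  | [], c :: qs =>
    have heq : c :: qs = a :: s' := List.Perm.eq_of_pairwise' hQ hs (by simpa using hperm)
    obtain ⟨rfl, rfl⟩ : c = a ∧ qs = s' := by simpa using heq
    exact ⟨rfl, by simp [bPop], Or.inr ⟨rfl, rfl⟩⟩
  | x :: bs, [] =>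
    have heq : x :: bs = a :: s' := List.Perm.eq_of_pairwise' hB hs (by simpa using hperm)
    obtain ⟨rfl, rfl⟩ : x = a ∧ bs = s' := by simpa using heq
    exact ⟨rfl, by simp [bPop], Or.inl ⟨rfl, rfl⟩⟩
  | x :: bs, c :: qs =>
    have haB : a ∈ x :: bs ∨ a ∈ c :: qs := by
      have := hperm.mem_iff.2 (List.mem_cons_self)
      rcases List.mem_append.1 this with h | h
      · exact Or.inl h
      · exact Or.inr h
    simp only [bPop]
    split
    · rename_i hxc
      have hxa : x = a := by
        have h1 : a ≤ x := ha x (by simp)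
        have h2 : x ≤ a := by
          rcases haB with h | h
          · rcases List.mem_cons.1 h with rfl | h
            · exact le_refl a
            · exact (List.pairwise_cons.1 hB).1 a h
          · rcases List.mem_cons.1 h with rfl | h
            · exact hxc
            · exact le_trans hxc ((List.pairwise_cons.1 hQ).1 a h)
        omega
      refine ⟨hxa, ?_, Or.inl ⟨by rw [hxa], rfl⟩⟩
      have hpx : (x :: (bs ++ c :: qs)).Perm (a :: s') := by simpa using hperm
      rw [hxa] at hpx
      exact hpx.cons_inv
    · rename_i hxc
      have hca : c = a := by
        have h1 : a ≤ c := ha c (by simp)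
        have h2 : c ≤ a := by
          rcases haB with h | h
          · rcases List.mem_cons.1 h with rfl | h
            · omega
            · exact le_trans (by omega) ((List.pairwise_cons.1 hB).1 a h)
          · rcases List.mem_cons.1 h with rfl | h
            · exact le_refl a
            · exact (List.pairwise_cons.1 hQ).1 a h
        omega
      refine ⟨hca, ?_, Or.inr ⟨rfl, by rw [hca]⟩⟩
      have hmid : ((x :: bs) ++ c :: qs).Perm (c :: ((x :: bs) ++ qs)) := List.perm_middle
      have hpx := hmid.symm.trans hperm
      rw [hca] at hpx
      exact hpx.cons_inv

-- an element of Q' ++ [L] that is not in the last position lies in Q'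
theorem mem_dropLast_of_append_singleton :
    ∀ (pre Q' : List Int) (L z : Int) (rest : List Int),
      Q' ++ [L] = pre ++ z :: rest → rest ≠ [] → z ∈ Q' := by
  intro pre
  induction pre with
  | nil =>
    intro Q' L z rest h hrest
    match Q' with
    | [] =>
      simp at h
      exact absurd h.2 hrest
    | w :: ws => simp at h; simp [h.1]
  | cons p ps ih =>
    intro Q' L z rest h hrest
    match Q' with
    | [] =>
      exfalso
      simp only [List.nil_append, List.cons_append] at h
      have := congrArg List.length h
      simp at this
    | w :: ws =>
      simp only [List.cons_append, List.cons.injEq] at h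
      exact List.mem_cons_of_mem w (ih ws L z rest h.2 hrest)

theorem sl_nil (K ans : Int) : solutionLoop K [] ans = 0 := by rw [solutionLoop.eq_def]

theorem sl_one (K a ans : Int) : solutionLoop K [a] ans = if a < K then -1 else ans := by
  rw [solutionLoop.eq_def]

theorem sl_cons (K a b : Int) (u : List Int) (ans : Int) :
    solutionLoop K (a :: b :: u) ans =
      if a < K then solutionLoop K (pvInsort (a + 2 * b) u) (ans + 1) else ans := by
  rw [solutionLoop.eq_def]

theorem alt_unfold (K : Int) (base q : List Int) (ans : Int) :
    solutionAltLoop K base q ans =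
      if base = [] ∧ q = [] then 0
      else if bPeek base q ≥ K then ans
      else if (bPop base q).2.1 = [] ∧ (bPop base q).2.2 = [] then -1
      else
        solutionAltLoop K (bPop (bPop base q).2.1 (bPop base q).2.2).2.1
          ((bPop (bPop base q).2.1 (bPop base q).2.2).2.2
            ++ [(bPop base q).1 + 2 * (bPop (bPop base q).2.1 (bPop base q).2.2).1])
          (ans + 1) := by
  rw [solutionAltLoop]
  simp only [dite_eq_ite]

theorem main_loop (K : Int) : ∀ n : Nat, ∀ s B Q : List Int, ∀ ans : Int,
    s.length ≤ n →
    s.Pairwise (· ≤ ·) → B.Pairwise (· ≤ ·) → Q.Pairwise (· ≤ ·) →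
    (B ++ Q).Perm s → QInv B Q →
    solutionLoop K s ans = solutionAltLoop K B Q ans := by
  intro n
  induction n with
  | zero =>
    intro s B Q ans hn _ _ _ hperm _
    have hs : s = [] := List.length_eq_zero_iff.1 (Nat.le_zero.1 hn)
    subst hs
    have hBQ : B ++ Q = [] := List.Perm.eq_nil hperm
    have hB : B = [] := by cases B <;> simp_all
    have hQn : Q = [] := by cases B <;> simp_all
    subst hB; subst hQn
    rw [sl_nil, alt_unfold]
    simp
  | succ n ih =>
    intro s B Q ans hn hsS hBS hQS hperm hinv
    match s, hsS, hn with
    | [], _, _ =>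
      have hBQ : B ++ Q = [] := List.Perm.eq_nil hperm
      have hB : B = [] := by cases B <;> simp_all
      have hQn : Q = [] := by cases B <;> simp_all
      subst hB; subst hQn
      rw [sl_nil, alt_unfold]
      simp
    | a :: t, hsS, hn =>
      have hne : ¬(B = [] ∧ Q = []) := by
        rintro ⟨rfl, rfl⟩
        exact absurd hperm.symm (by simp)
      obtain ⟨hv1, hp1, hsh1⟩ := bPop_spec B Q t a hBS hQS hsS hperm
      rw [alt_unfold, if_neg hne, bPeek_eq_pop, hv1]
      set B1 := (bPop B Q).2.1 with hB1
      set Q1 := (bPop B Q).2.2 with hQ1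
      have hB1S : B1.Pairwise (· ≤ ·) := by
        rcases hsh1 with ⟨h, _⟩ | ⟨h, _⟩
        · rw [h] at hBS; exact (List.pairwise_cons.1 hBS).2
        · rw [h]; exact hBS
      have hQ1S : Q1.Pairwise (· ≤ ·) := by
        rcases hsh1 with ⟨_, h⟩ | ⟨_, h⟩
        · rw [h]; exact hQS
        · rw [h] at hQS; exact (List.pairwise_cons.1 hQS).2
      match t, hp1, hsS, hn with
      | [], hp1, _, _ =>
        have h1 : B1 = [] := by
          have := List.Perm.eq_nil hp1; cases hB' : B1 <;> simp_all
        have h2 : Q1 = [] := by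
          have := List.Perm.eq_nil hp1; cases hB' : B1 <;> simp_all
        rw [sl_one]
        by_cases hK : a < K
        · rw [if_pos hK, if_neg (by omega), if_pos ⟨h1, h2⟩]
        · rw [if_neg hK, if_pos (by omega)]
      | b :: u, hp1, hsS, hn =>
        have htS : (b :: u).Pairwise (· ≤ ·) := (List.pairwise_cons.1 hsS).2
        obtain ⟨hv2, hp2, hsh2⟩ := bPop_spec B1 Q1 u b hB1S hQ1S htS hp1
        rw [sl_cons]
        by_cases hK : a < K
        swap
        · rw [if_neg hK, if_pos (by omega)]
        rw [if_pos hK, if_neg (by omega)]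
        have hne2 : ¬(B1 = [] ∧ Q1 = []) := by
          rintro ⟨h1, h2⟩
          rw [h1, h2] at hp1
          exact absurd hp1.symm (by simp)
        rw [if_neg hne2, hv2]
        set B2 := (bPop B1 Q1).2.1 with hB2
        set Q2 := (bPop B1 Q1).2.2 with hQ2
        have hab : a ≤ b := (List.pairwise_cons.1 hsS).1 b (by simp)
        have hbu : ∀ x ∈ u, b ≤ x := (List.pairwise_cons.1 htS).1
        have huS : u.Pairwise (· ≤ ·) := (List.pairwise_cons.1 htS).2
        have hB2S : B2.Pairwise (· ≤ ·) := by
          rcases hsh2 with ⟨h, _⟩ | ⟨h, _⟩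
          · rw [h] at hB1S; exact (List.pairwise_cons.1 hB1S).2
          · rw [h]; exact hB1S
        have hQ2S : Q2.Pairwise (· ≤ ·) := by
          rcases hsh2 with ⟨_, h⟩ | ⟨_, h⟩
          · rw [h]; exact hQ1S
          · rw [h] at hQ1S; exact (List.pairwise_cons.1 hQ1S).2
        -- every element still in play is ≥ b
        have hge : ∀ x ∈ B2 ++ Q2, b ≤ x := fun x hx => hbu x (hp2.mem_iff.1 hx)
        -- the new mixed value a + 2*b dominates all of Q2 (uses QInv)
        have hdom : ∀ x ∈ Q2, x ≤ a + 2 * b := by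
          cases hQ2e : Q2 with
          | nil => intro x hx; simp at hx
          | cons y ys =>
            rcases hinv with hQnil | ⟨m, Q'', L, hQeq, hmB, hmQ', hL⟩
            · -- Q = [] forces Q1 = [] and Q2 = []
              exfalso
              have hQ1nil : Q1 = [] := by
                rcases hsh1 with ⟨_, h⟩ | ⟨_, h⟩
                · rw [h, hQnil]
                · rw [hQnil] at h; cases h
              rcases hsh2 with ⟨_, h⟩ | ⟨_, h⟩
              · rw [hQ2e, hQ1nil] at h; cases h
              · rw [hQ1nil] at h; cases h
            · have hQL : ∀ x ∈ Q, x ≤ L := by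
                intro x hx
                rw [hQeq] at hx
                rcases List.mem_append.1 hx with hx | hx
                · rw [hQeq] at hQS
                  exact (List.pairwise_append.1 hQS).2.2 x hx L (by simp)
                · simp at hx; omega
              have hQ1ne : Q1 ≠ [] := by
                rcases hsh2 with ⟨_, h⟩ | ⟨_, h⟩
                · rw [hQ2e] at h; rw [← h]; simp
                · rw [h]; simp
              have hma : m ≤ a := by
                rcases hsh1 with ⟨hBsh, _⟩ | ⟨_, hQsh⟩
                · exact hmB a (by rw [hBsh]; simp)
                · exact hmQ' _ (mem_dropLast_of_append_singleton [] Q'' L a Q1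
                    (by rw [← hQeq, hQsh]; simp) hQ1ne)
              have hmb : m ≤ b := by
                rcases hsh2 with ⟨hBsh, _⟩ | ⟨_, hQsh⟩
                · -- b was popped from the base queue
                  apply hmB
                  rcases hsh1 with ⟨h, _⟩ | ⟨h, _⟩
                  · rw [h, hBsh]; simp
                  · rw [← h, hBsh]; simp
                · -- b was popped from q, strictly before the still-present tail
                  have hQ2ne : Q2 ≠ [] := by rw [hQ2e]; simp
                  rcases hsh1 with ⟨_, h⟩ | ⟨_, h⟩
                  · exact hmQ' _ (mem_dropLast_of_append_singleton [] Q'' L b Q2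
                      (by rw [← hQeq, ← h, hQsh]; simp) hQ2ne)
                  · exact hmQ' _ (mem_dropLast_of_append_singleton [a] Q'' L b Q2
                      (by rw [← hQeq, h, hQsh]; simp) hQ2ne)
              intro x hx
              have hxQ : x ∈ Q := by
                have hxQ1 : x ∈ Q1 := by
                  rcases hsh2 with ⟨_, h⟩ | ⟨_, h⟩
                  · rw [← h, hQ2e]; exact hx
                  · rw [h, hQ2e]; exact List.mem_cons_of_mem b hx
                rcases hsh1 with ⟨_, h⟩ | ⟨_, h⟩
                · rw [← h]; exact hxQ1
                · rw [h]; exact List.mem_cons_of_mem a hxQ1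
              have := hQL x hxQ
              omega
        -- apply the induction hypothesis to the shrunken state
        apply ih
        · rw [pvInsort_length]
          simp only [List.length_cons] at hn
          omega
        · exact pvInsort_sorted _ _ huS
        · exact hB2S
        · refine List.pairwise_append.2 ⟨hQ2S, by simp, ?_⟩
          intro x hx z hz
          simp at hz
          subst hz
          exact hdom x hx
        · refine List.Perm.trans ?_ (pvInsort_perm _ u).symm
          have h1 : (B2 ++ (Q2 ++ [a + 2 * b])).Perm ((a + 2 * b) :: (B2 ++ Q2)) := by
            rw [← List.append_assoc]
            exact List.perm_append_singleton _ _
          exact h1.trans (hp2.cons _)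
        · exact Or.inr ⟨b, Q2, a + 2 * b, rfl,
            fun x hx => hge x (List.mem_append.2 (Or.inl hx)),
            fun x hx => hge x (List.mem_append.2 (Or.inr hx)),
            by omega⟩

-- ===== VERDICT (by name: the statement is the Claim_ definition above) =====
theorem solution_spec : Claim_equal_solution := by
  intro scoville K _ _
  unfold Spec_solution solution solution_alt
  apply main_loop K (scoville.foldl (fun heap i => pvInsort i heap) []).length
  · exact le_refl _
  · exact foldl_insort_sorted scoville [] (by simp)
  · exact PySem.List.sorted_pairwise scoville (fun x => x)
  · exact List.Pairwise.nil
  · rw [List.append_nil]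
    refine (PySem.List.sorted_perm scoville (fun x => x) false).trans ?_
    refine ((foldl_insort_perm scoville []).trans ?_).symm
    rw [List.append_nil]
  · exact Or.inl rfl
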